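-- pv_equiv track=rewrite | github.com/cwgong/brand_clean_test_ext | brand_clean_ext1_test/tornado-demo-service/brand_recognition.py | _brand_pair_correction
-- ===== SOURCE A (Python) =====
-- def _brand_pair_correction(exchange_dict, conflict_brand_set):
--     # Tips: {1:2, 2:3, 3:4}这种情况会有错误
--
--     tmp_dict = {}
--     for k, v in exchange_dict.items():
--         if k in conflict_brand_set:
--             right_brand = exchange_dict[k]
--             for k1, v1 in exchange_dict.items():
--                 if v1 == k:
--                     tmp_dict[k1] = right_brand
--
--     exchange_dict_ext = {}
--     for k2, v2 in exchange_dict.items():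
--         if k2 == v2: continue
--         if k2 in conflict_brand_set: continue
--         if k2 in tmp_dict:
--             exchange_dict_ext[k2] = tmp_dict[k2]
--         else:
--             exchange_dict_ext[k2] = v2
--
--     return exchange_dict_ext
-- ===== SOURCE B (Python) =====
-- def _brand_pair_correction(exchange_dict, conflict_brand_set):
--     # Single pass: do the conflict-override lookup inline instead of
--     # building tmp_dict with a nested scan.
--     result = {}
--     for k, v in exchange_dict.items():
--         if k == v or k in conflict_brand_set:
--             continue
--         if v in conflict_brand_set and v in exchange_dict:
--             result[k] = exchange_dict[v]
--         else:
--             result[k] = v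
--     return result
-- ===== Notes on version B (the rewrite author's own statement) =====
-- stated objective: faster
-- what changed: Replaces the two-pass build-tmp_dict-then-reemit structure (with a nested scan over exchange_dict for every conflict key) by a single pass that does the override lookup (v in conflict set and in exchange_dict -> exchange_dict[v]) inline.
import Mathlib
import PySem

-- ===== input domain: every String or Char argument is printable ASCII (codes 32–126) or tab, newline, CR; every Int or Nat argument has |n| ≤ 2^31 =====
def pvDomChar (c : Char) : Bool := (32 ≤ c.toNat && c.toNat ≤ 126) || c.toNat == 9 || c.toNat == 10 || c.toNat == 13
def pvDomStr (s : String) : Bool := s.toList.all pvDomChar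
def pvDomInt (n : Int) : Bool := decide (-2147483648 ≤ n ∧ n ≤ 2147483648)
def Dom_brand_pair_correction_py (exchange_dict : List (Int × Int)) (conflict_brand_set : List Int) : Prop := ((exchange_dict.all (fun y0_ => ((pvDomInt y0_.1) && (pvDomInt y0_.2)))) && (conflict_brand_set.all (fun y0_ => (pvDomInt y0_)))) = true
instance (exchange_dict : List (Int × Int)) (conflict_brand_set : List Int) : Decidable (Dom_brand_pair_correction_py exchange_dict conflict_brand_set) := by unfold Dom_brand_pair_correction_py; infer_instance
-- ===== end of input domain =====

-- B replaces A's two passes (build tmp_dict with a nested scan, then re-emit) by one pass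
-- with the override lookup done inline; return value only, no argument is mutated.

-- ===== PORT A =====
def brand_pair_correction_py (exchange_dict : List (Int × Int)) (conflict_brand_set : List Int) : List (Int × Int) :=
  let ed : PySem.Dict Int Int := PySem.Dict.mk exchange_dict
  let tmp : PySem.Dict Int Int :=
    exchange_dict.foldl (fun tmp kv =>
      if conflict_brand_set.contains kv.1 then
        -- exchange_dict[k]: k is a key of exchange_dict, so the lookup cannot raise
        let right_brand : Int := (ed.get? kv.1).getD 0
        exchange_dict.foldl (fun t p => if p.2 == kv.1 then t.insert p.1 right_brand else t) tmp
      else tmp) PySem.Dict.empty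
  let ext : PySem.Dict Int Int :=
    exchange_dict.foldl (fun e kv =>
      if kv.1 == kv.2 then e
      else if conflict_brand_set.contains kv.1 then e
      else match tmp.get? kv.1 with
        | some w => e.insert kv.1 w
        | none => e.insert kv.1 kv.2) PySem.Dict.empty
  ext.items

-- ===== PORT B =====
def brand_pair_correction_py_alt (exchange_dict : List (Int × Int)) (conflict_brand_set : List Int) : List (Int × Int) :=
  let ed : PySem.Dict Int Int := PySem.Dict.mk exchange_dict
  (exchange_dict.foldl (fun res kv =>
    if kv.1 == kv.2 || conflict_brand_set.contains kv.1 then res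
    else if conflict_brand_set.contains kv.2 && ed.contains kv.2 then
      res.insert kv.1 ((ed.get? kv.2).getD 0)
    else res.insert kv.1 kv.2) (PySem.Dict.empty : PySem.Dict Int Int)).items

-- ===== PRECONDITION & SPEC =====
-- The list encodes a Python dict, whose keys are unique; Pre_ excludes only duplicate-key
-- lists, which do not arise from any Python dict input.
def Pre_brand_pair_correction_py (exchange_dict : List (Int × Int)) (conflict_brand_set : List Int) : Prop :=
  (exchange_dict.map Prod.fst).Nodup
instance (exchange_dict : List (Int × Int)) (conflict_brand_set : List Int) : Decidable (Pre_brand_pair_correction_py exchange_dict conflict_brand_set) := by unfold Pre_brand_pair_correction_py; infer_instance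
def pvWitness_brand_pair_correction_py : (List (Int × Int)) × List Int := ([(1, 2), (2, 3), (3, 3)], [2])
def Spec_brand_pair_correction_py (exchange_dict : List (Int × Int)) (conflict_brand_set : List Int) (out : List (Int × Int)) : Prop := out = brand_pair_correction_py_alt exchange_dict conflict_brand_set
instance (exchange_dict : List (Int × Int)) (conflict_brand_set : List Int) (out : List (Int × Int)) : Decidable (Spec_brand_pair_correction_py exchange_dict conflict_brand_set out) := by unfold Spec_brand_pair_correction_py; infer_instance

-- ===== CLAIM (what is proved, stated in full; the proofs are below) =====
def Claim_equal_brand_pair_correction_py : Prop := ∀ (exchange_dict : List (Int × Int)) (conflict_brand_set : List Int), Dom_brand_pair_correction_py exchange_dict conflict_brand_set → Pre_brand_pair_correction_py exchange_dict conflict_brand_set → Spec_brand_pair_correction_py exchange_dict conflict_brand_set (brand_pair_correction_py exchange_dict conflict_brand_set)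

-- ===== LEMMAS AND PROOFS =====

-- keys are unique, so two entries with the same key coincide
theorem pv_key_unique {l : List (Int × Int)} (hnd : (l.map Prod.fst).Nodup)
    {x a b : Int} (ha : (x, a) ∈ l) (hb : (x, b) ∈ l) : a = b := by
  induction l with
  | nil => cases ha
  | cons p l ih =>
    simp only [List.map_cons, List.nodup_cons] at hnd
    rcases List.mem_cons.1 ha with ha1 | ha1 <;> rcases List.mem_cons.1 hb with hb1 | hb1
    · rw [← ha1] at hb1; exact (Prod.mk.injEq .. ▸ hb1 :).2.symm
    · have hx : p.1 = x := by rw [← ha1]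
      exact absurd (List.mem_map.2 ⟨(x, b), hb1, rfl⟩) (hx ▸ hnd.1)
    · have hx : p.1 = x := by rw [← hb1]
      exact absurd (List.mem_map.2 ⟨(x, a), ha1, rfl⟩) (hx ▸ hnd.1)
    · exact ih hnd.2 ha1 hb1

theorem pv_get?_mk_of_mem {l : List (Int × Int)} (hnd : (l.map Prod.fst).Nodup)
    {x v : Int} (h : (x, v) ∈ l) : (PySem.Dict.mk l).get? x = some v := by
  induction l with
  | nil => cases h
  | cons p l ih =>
    simp only [List.map_cons, List.nodup_cons] at hnd
    rw [show (p : Int × Int) = (p.1, p.2) from rfl, PySem.Dict.get?_mk_cons]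
    rcases List.mem_cons.1 h with h1 | h1
    · simp [← h1]
    · have hne : p.1 ≠ x := by
        intro he; exact hnd.1 (List.mem_map.2 ⟨(x, v), h1, by simp [he]⟩)
      simp only [beq_iff_eq, if_neg hne]
      exact ih hnd.2 h1

theorem pv_mem_of_get?_mk {l : List (Int × Int)} {x v : Int}
    (h : (PySem.Dict.mk l).get? x = some v) : (x, v) ∈ l := by
  induction l with
  | nil => simp [PySem.Dict.get?] at h
  | cons p l ih =>
    rw [show (p : Int × Int) = (p.1, p.2) from rfl, PySem.Dict.get?_mk_cons] at h
    by_cases he : p.1 = x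
    · simp [he] at h; exact List.mem_cons.2 (Or.inl (by rw [← he, ← h]))
    · simp [he] at h; exact List.mem_cons.2 (Or.inr (ih h))

-- the inner loop of A's first pass: every insert carries the same value r
theorem pv_inner_get (l : List (Int × Int)) (t : PySem.Dict Int Int) (x c r : Int) :
    (l.foldl (fun t p => if p.2 == c then t.insert p.1 r else t) t).get? x =
      if l.any (fun p => p.1 == x && p.2 == c) then some r else t.get? x := by
  induction l generalizing t with
  | nil => simp
  | cons p l ih =>
    simp only [List.foldl_cons, List.any_cons]
    by_cases hc : p.2 = c
    · rw [if_pos (by simp [hc])]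
      rw [ih]
      by_cases hl : l.any (fun p => p.1 == x && p.2 == c)
      · simp [hl, hc]
      · simp only [hl, if_neg, Bool.or_false]
        by_cases hx : p.1 = x
        · simp [hx, hc, hl, PySem.Dict.get?_insert_self]
        · have : x ≠ p.1 := fun h => hx h.symm
          simp [hx, hc, hl, PySem.Dict.get?_insert_of_ne _ _ this]
    · rw [if_neg (by simp [hc]), ih]
      simp [hc]

-- A's first pass: tmp_dict's lookup at a key x of exchange_dict
theorem pv_outer_get (full : List (Int × Int)) (cs : List Int)
    (hnd : (full.map Prod.fst).Nodup) {x vx : Int} (hmem : (x, vx) ∈ full)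
    (l : List (Int × Int)) (hl : ∀ e ∈ l, e ∈ full) (t : PySem.Dict Int Int) :
    (l.foldl (fun tmp kv =>
        if cs.contains kv.1 then
          full.foldl (fun t p => if p.2 == kv.1 then t.insert p.1 (((PySem.Dict.mk full).get? kv.1).getD 0) else t) tmp
        else tmp) t).get? x =
      if cs.contains vx && l.any (fun e => e.1 == vx) then
        some (((PySem.Dict.mk full).get? vx).getD 0)
      else t.get? x := by
  induction l generalizing t with
  | nil => simp
  | cons e l ih =>
    have hl' : ∀ e' ∈ l, e' ∈ full := fun e' h => hl e' (List.mem_cons.2 (Or.inr h))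
    simp only [List.foldl_cons, List.any_cons]
    have hhit : (full.any (fun p => p.1 == x && p.2 == e.1)) = (e.1 == vx) := by
      by_cases hev : e.1 = vx
      · simp only [hev, beq_self_eq_true]
        exact List.any_eq_true.2 ⟨(x, vx), hmem, by simp [hev]⟩
      · have hb : (e.1 == vx) = false := by simp [hev]
        rw [hb, List.any_eq_false]
        rintro ⟨a, b⟩ hab
        simp only [Bool.and_eq_true, beq_iff_eq, not_and]
        rintro rfl rfl
        exact hev (pv_key_unique hnd hab hmem)
    by_cases hce : cs.contains e.1
    · rw [if_pos hce, ih hl', pv_inner_get, hhit]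
      by_cases hev : e.1 = vx
      · have hcv : cs.contains vx = true := hev ▸ hce
        simp only [hev, hcv, beq_self_eq_true, Bool.true_and, Bool.or_true, Bool.true_or, if_true]
        split_ifs <;> rfl
      · have hb : (e.1 == vx) = false := by simp [hev]
        simp only [hb, Bool.false_or, Bool.false_eq_true, if_false]
    · rw [if_neg hce, ih hl']
      by_cases hev : e.1 = vx
      · have hcv : cs.contains vx = false := by rw [← hev]; exact eq_false_of_ne_true hce
        simp only [hcv, Bool.false_and, Bool.false_eq_true, if_false]
      · have hb : (e.1 == vx) = false := by simp [hev]
        simp only [hb, Bool.false_or, Bool.false_eq_true, if_false]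

-- ===== VERDICT (by name: the statement is the Claim_ definition above) =====
theorem brand_pair_correction_py_spec : Claim_equal_brand_pair_correction_py := by
  intro ed cs _ hnd
  unfold Spec_brand_pair_correction_py brand_pair_correction_py brand_pair_correction_py_alt
  refine congrArg PySem.Dict.items ?_
  refine PySem.List.foldl_congr_mem _ _ _ _ ?_
  intro acc kv hkv
  have hget : (PySem.Dict.mk ed).get? kv.1 = some kv.2 := pv_get?_mk_of_mem hnd hkv
  by_cases h1 : kv.1 = kv.2
  · have hb1 : (kv.1 == kv.2) = true := by simp [h1]
    simp only [hb1, Bool.true_or, if_true]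
  by_cases h2 : cs.contains kv.1 = true
  · have hb1 : (kv.1 == kv.2) = false := by simp [h1]
    simp only [hb1, h2, Bool.false_or, Bool.false_eq_true, if_false, if_true]
  have hb1 : (kv.1 == kv.2) = false := by simp [h1]
  have hb2 : cs.contains kv.1 = false := eq_false_of_ne_true h2
  simp only [hb1, hb2, Bool.false_or, Bool.false_eq_true, if_false]
  have htmp := pv_outer_get ed cs hnd hkv ed (fun _ h => h) PySem.Dict.empty
  have hany : (ed.any (fun e => e.1 == kv.2)) = (PySem.Dict.mk ed).contains kv.2 := by
    rw [PySem.Dict.contains_eq_isSome_get?]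
    by_cases hc : ed.any (fun e => e.1 == kv.2)
    · rcases List.any_eq_true.1 hc with ⟨e, he, hee⟩
      rw [hc, pv_get?_mk_of_mem hnd (show (kv.2, e.2) ∈ ed from by
        have : e = (kv.2, e.2) := by
          have : e.1 = kv.2 := by simpa using hee
          exact Prod.ext this rfl
        exact this ▸ he)]
      rfl
    · rw [eq_false_of_ne_true hc]
      cases hg : (PySem.Dict.mk ed).get? kv.2 with
      | none => rfl
      | some w =>
        exact absurd (List.any_eq_true.2 ⟨(kv.2, w), pv_mem_of_get?_mk hg, by simp⟩) hc
  rw [htmp, hany]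
  by_cases h3 : (cs.contains kv.2 && (PySem.Dict.mk ed).contains kv.2) = true
  · simp only [h3, if_true]
  · have h3' : (cs.contains kv.2 && (PySem.Dict.mk ed).contains kv.2) = false := eq_false_of_ne_true h3
    simp only [h3', Bool.false_eq_true, if_false, PySem.Dict.get?_empty]
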